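-- pv_equiv track=rewrite | github.com/ProgrammerApasionated/Program-I | PrimerSemestreProgramación/EjerciciosFinales/PrimerExamen/ExamenFinal1.py | ciudades_con_ola_de_frio
-- ===== SOURCE A (Python) =====
-- def ciudades_con_ola_de_frio(lista_temperaturas, nombre_ciudades,n):
--     lista_ciudades_frias = []
--     for i in range (len(lista_temperaturas)):
--         longitud = 0
--         longitud_max = -1
--         print (f"La ciudad {nombre_ciudades[i]} está evaluandose")
--         for j in range (len(lista_temperaturas[0])):
--             if lista_temperaturas[i][j] < 0:
--                 longitud += 1
--             else:
--                 if longitud_max < longitud: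
--                     longitud_max = longitud
--                 longitud = 0
--         # Recorremos la matriz y aumentamos la longitud o la reiniciamos para luego evaluarla.
--         if longitud_max < longitud:
--             longitud_max = longitud
--         # En el caso de que hay todas las temperaturas negativas no hay valor de longitud máxima, así que hace falta esta parte.
--         if longitud_max >= n:
--             lista_ciudades_frias.append(nombre_ciudades[i])
--         # Evaluamos si hay más días que el dato que nos da el usuario.
--     return lista_ciudades_frias
-- ===== SOURCE B (Python) =====
-- def _racha_maxima(fila):
--     # boundaries: positions of non-negative temperatures, plus the end of the row;
--     # the gaps between consecutive boundaries (with a sentinel -1 in front) are the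
--     # lengths of the maximal runs of negative temperatures.
--     bounds = [j for j, t in enumerate(fila) if t >= 0] + [len(fila)]
--     return max(b - a - 1 for a, b in zip([-1] + bounds, bounds))
--
--
-- def ciudades_con_ola_de_frio(lista_temperaturas, nombre_ciudades, n):
--     ciudades_frias = []
--     k = len(lista_temperaturas[0]) if lista_temperaturas else 0
--     for i in range(len(lista_temperaturas)):
--         print(f"La ciudad {nombre_ciudades[i]} está evaluandose")
--         if _racha_maxima(lista_temperaturas[i][:k]) >= n:
--             ciudades_frias.append(nombre_ciudades[i])
--     return ciudades_frias
-- ===== Notes on version B (the rewrite author's own statement) =====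
-- stated objective: alternative
-- what changed: A's running counter-with-reset over indices is replaced by a boundary-gap computation: B lists the positions of non-negative temperatures in the truncated row and takes the largest gap between consecutive boundaries.
import Mathlib
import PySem

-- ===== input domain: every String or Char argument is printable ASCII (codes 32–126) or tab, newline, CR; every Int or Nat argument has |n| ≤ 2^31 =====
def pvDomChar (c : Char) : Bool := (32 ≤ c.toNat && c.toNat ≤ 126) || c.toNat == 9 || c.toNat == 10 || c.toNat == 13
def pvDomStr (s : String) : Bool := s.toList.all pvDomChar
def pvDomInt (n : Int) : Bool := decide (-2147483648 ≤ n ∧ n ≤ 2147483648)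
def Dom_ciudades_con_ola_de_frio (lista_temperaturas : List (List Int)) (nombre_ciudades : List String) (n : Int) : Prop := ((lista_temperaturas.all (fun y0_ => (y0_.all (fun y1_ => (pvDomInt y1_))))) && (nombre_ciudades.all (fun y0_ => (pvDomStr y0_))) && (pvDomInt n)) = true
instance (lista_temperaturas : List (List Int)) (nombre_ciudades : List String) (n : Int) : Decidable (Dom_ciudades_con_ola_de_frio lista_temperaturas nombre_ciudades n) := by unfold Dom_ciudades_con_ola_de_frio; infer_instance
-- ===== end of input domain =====

-- B replaces A's running counter-with-reset by a boundary-gap computation (gaps between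
-- consecutive non-negative positions); equivalence is about the RETURN value only — both
-- Pythons also print one line per city, which is not modelled here.

-- ===== PORT A =====
def ciudades_con_ola_de_frio (lista_temperaturas : List (List Int)) (nombre_ciudades : List String) (n : Int) : List String :=
  (PySem.List.pyRange 0 (lista_temperaturas.length : Int) 1).foldl (fun acc i =>
    let fila := PySem.List.pyGetD lista_temperaturas i []
    -- inner loop state: (longitud, longitud_max), started at (0, -1)
    let st := (PySem.List.pyRange 0 ((PySem.List.pyGetD lista_temperaturas 0 []).length : Int) 1).foldl
      (fun (p : Int × Int) j =>
        if PySem.List.pyGetD fila j 0 < 0 then (p.1 + 1, p.2)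
        else (0, if p.2 < p.1 then p.1 else p.2)) (0, -1)
    let longitud_max := if st.2 < st.1 then st.1 else st.2
    if longitud_max ≥ n then acc ++ [PySem.List.pyGetD nombre_ciudades i ""] else acc) []

-- ===== PORT B =====
-- Source B's helper _racha_maxima: boundaries = non-negative positions plus the end of the row;
-- the answer is the largest gap between consecutive boundaries (sentinel -1 in front).
def racha_maxima (fila : List Int) : Int :=
  let bounds := ((PySem.List.enumerate fila 0).filterMap
      (fun p => if p.2 ≥ 0 then some p.1 else none)) ++ [(fila.length : Int)]
  match ([-1] ++ bounds).zip bounds with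
  | [] => 0  -- unreachable: bounds is never empty
  | p :: ps => ps.foldl (fun m q => max m (q.2 - q.1 - 1)) (p.2 - p.1 - 1)

def ciudades_con_ola_de_frio_alt (lista_temperaturas : List (List Int)) (nombre_ciudades : List String) (n : Int) : List String :=
  let k : Int := match lista_temperaturas with | [] => 0 | f :: _ => (f.length : Int)
  (PySem.List.pyRange 0 (lista_temperaturas.length : Int) 1).foldl (fun acc i =>
    if racha_maxima (PySem.List.slice (PySem.List.pyGetD lista_temperaturas i []) none (some k)) ≥ n
    then acc ++ [PySem.List.pyGetD nombre_ciudades i ""] else acc) []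

-- ===== PRECONDITION & SPEC =====
-- A raises IndexError when a city name is missing or a later row is shorter than row 0
-- (every row is read up to len(lista_temperaturas[0])); exactly those inputs are excluded.
def Pre_ciudades_con_ola_de_frio (lista_temperaturas : List (List Int)) (nombre_ciudades : List String) (n : Int) : Prop :=
  lista_temperaturas.length ≤ nombre_ciudades.length ∧
  ∀ fila ∈ lista_temperaturas, (lista_temperaturas.headD []).length ≤ fila.length
instance (lista_temperaturas : List (List Int)) (nombre_ciudades : List String) (n : Int) : Decidable (Pre_ciudades_con_ola_de_frio lista_temperaturas nombre_ciudades n) := by unfold Pre_ciudades_con_ola_de_frio; infer_instance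

def pvWitness_ciudades_con_ola_de_frio : List (List Int) × List String × Int :=
  ([[-1, 2, -1], [0, -3, -4]], ["a", "b"], 2)

def Spec_ciudades_con_ola_de_frio (lista_temperaturas : List (List Int)) (nombre_ciudades : List String) (n : Int) (out : List String) : Prop := out = ciudades_con_ola_de_frio_alt lista_temperaturas nombre_ciudades n
instance (lista_temperaturas : List (List Int)) (nombre_ciudades : List String) (n : Int) (out : List String) : Decidable (Spec_ciudades_con_ola_de_frio lista_temperaturas nombre_ciudades n out) := by unfold Spec_ciudades_con_ola_de_frio; infer_instance

-- ===== CLAIM (what is proved, stated in full; the proofs are below) =====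
def Claim_equal_ciudades_con_ola_de_frio : Prop := ∀ (lista_temperaturas : List (List Int)) (nombre_ciudades : List String) (n : Int), Dom_ciudades_con_ola_de_frio lista_temperaturas nombre_ciudades n → Pre_ciudades_con_ola_de_frio lista_temperaturas nombre_ciudades n → Spec_ciudades_con_ola_de_frio lista_temperaturas nombre_ciudades n (ciudades_con_ola_de_frio lista_temperaturas nombre_ciudades n)

-- ===== LEMMAS AND PROOFS =====

-- length (in days) of the longest run of negative temperatures in l, when a run of c
-- negative days is already open just before l
def negRunG (c : Int) : List Int → Int
  | [] => c
  | x :: xs => if x < 0 then negRunG (c + 1) xs else max c (negRunG 0 xs)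

-- positions (from offset s) of the non-negative entries, as B's comprehension computes them
def posIdx (l : List Int) (s : Int) : List Int :=
  (PySem.List.enumerate l s).filterMap (fun p => if p.2 ≥ 0 then some p.1 else none)

-- the list of gaps between consecutive boundaries
def chain (prev : Int) : List Int → List Int
  | [] => []
  | b :: bs => (b - prev - 1) :: chain b bs

def maxOf : List Int → Int
  | [] => 0
  | x :: xs => xs.foldl max x

lemma posIdx_nil (s : Int) : posIdx [] s = [] := rfl

lemma posIdx_cons (x : Int) (xs : List Int) (s : Int) :
    posIdx (x :: xs) s = if x ≥ 0 then s :: posIdx xs (s + 1) else posIdx xs (s + 1) := by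
  simp only [posIdx, PySem.List.enumerate_cons, List.filterMap_cons]
  split_ifs <;> rfl

lemma foldl_max_comm (ys : List Int) : ∀ c y, ys.foldl max (max c y) = max c (ys.foldl max y) := by
  induction ys with
  | nil => intro c y; rfl
  | cons z zs ih => intro c y; simp only [List.foldl, max_assoc, ih]

lemma maxOf_cons (c : Int) (L : List Int) (h : L ≠ []) : maxOf (c :: L) = max c (maxOf L) := by
  cases L with
  | nil => exact absurd rfl h
  | cons y ys => simp only [maxOf, List.foldl, foldl_max_comm]

lemma chain_ne_nil (prev : Int) (bs : List Int) (h : bs ≠ []) : chain prev bs ≠ [] := by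
  cases bs with
  | nil => exact absurd rfl h
  | cons b t => simp [chain]

lemma negRunG_nonneg (l : List Int) : ∀ c : Int, 0 ≤ c → 0 ≤ negRunG c l := by
  induction l with
  | nil => intro c hc; exact hc
  | cons x xs ih =>
    intro c hc
    simp only [negRunG]
    split_ifs with hx
    · exact ih (c + 1) (by omega)
    · exact le_trans hc (le_max_left _ _)

-- A's inner loop, characterised: final longitud_max = max b (negRunG c l)
lemma aRun (l : List Int) : ∀ c b : Int,
    (if (l.foldl (fun (p : Int × Int) x =>
          if x < 0 then (p.1 + 1, p.2) else (0, if p.2 < p.1 then p.1 else p.2)) (c, b)).2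
        < (l.foldl (fun (p : Int × Int) x =>
          if x < 0 then (p.1 + 1, p.2) else (0, if p.2 < p.1 then p.1 else p.2)) (c, b)).1
      then (l.foldl (fun (p : Int × Int) x =>
          if x < 0 then (p.1 + 1, p.2) else (0, if p.2 < p.1 then p.1 else p.2)) (c, b)).1
      else (l.foldl (fun (p : Int × Int) x =>
          if x < 0 then (p.1 + 1, p.2) else (0, if p.2 < p.1 then p.1 else p.2)) (c, b)).2)
    = max b (negRunG c l) := by
  induction l with
  | nil =>
    intro c b
    simp only [List.foldl, negRunG, Int.max_def]
    split_ifs <;> omega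
  | cons x xs ih =>
    intro c b
    simp only [List.foldl]
    by_cases hx : x < 0
    · rw [if_pos hx, ih (c + 1) b]
      simp only [negRunG, if_pos hx]
    · rw [if_neg hx, ih 0 (if b < c then c else b)]
      have h1 : (if b < c then c else b) = max b c := by rw [Int.max_def]; split_ifs <;> omega
      rw [h1, max_assoc]
      simp only [negRunG, if_neg hx]

-- B's boundary-gap pass, characterised
lemma chainMax (l : List Int) : ∀ (c s : Int), 0 ≤ c →
    maxOf (chain (s - c - 1) (posIdx l s ++ [s + (l.length : Int)])) = negRunG c l := by
  induction l with
  | nil =>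
    intro c s _
    simp only [posIdx_nil, List.nil_append, List.length_nil, Int.natCast_zero, add_zero,
      chain, negRunG, maxOf, List.foldl_nil]
    ring
  | cons x xs ih =>
    intro c s hc
    have hlen : s + ((x :: xs).length : Int) = (s + 1) + (xs.length : Int) := by
      simp [List.length_cons]; ring
    rw [posIdx_cons, hlen]
    split_ifs with hx
    · -- x ≥ 0: boundary at s, gap c, then the rest relative to prev = s
      simp only [List.cons_append, chain]
      have h1 : s - (s - c - 1) - 1 = c := by ring
      have h2 : chain s (posIdx xs (s + 1) ++ [s + 1 + (xs.length : Int)])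
          = chain ((s + 1) - 0 - 1) (posIdx xs (s + 1) ++ [(s + 1) + (xs.length : Int)]) := by
        norm_num
      rw [h1, h2, maxOf_cons _ _ (chain_ne_nil _ _ (by simp)), ih 0 (s + 1) le_rfl]
      simp only [negRunG]
      rw [if_neg (by omega)]
    · -- x < 0: the open run grows by one
      have h3 : s - c - 1 = (s + 1) - (c + 1) - 1 := by ring
      rw [h3, ih (c + 1) (s + 1) (by omega)]
      simp only [negRunG]
      rw [if_pos (by omega)]

lemma zipFold (bs : List Int) : ∀ (prev m : Int),
    (((prev :: bs)).zip bs).foldl (fun m q => max m (q.2 - q.1 - 1)) m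
      = (chain prev bs).foldl max m := by
  induction bs with
  | nil => intro prev m; rfl
  | cons b t ih => intro prev m; simp only [List.zip_cons_cons, List.foldl, chain, ih]

lemma racha_eq (l : List Int) : racha_maxima l = negRunG 0 l := by
  have key := chainMax l 0 0 le_rfl
  simp only [zero_sub, zero_add] at key
  rw [← key]
  simp only [racha_maxima, posIdx]
  cases h : (PySem.List.enumerate l 0).filterMap (fun p => if p.2 ≥ 0 then some p.1 else none) ++ [(l.length : Int)] with
  | nil => exact absurd h (by simp)
  | cons b bs =>
    simp only [List.cons_append, List.zip_cons_cons, chain, maxOf]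
    norm_num
    exact zipFold bs b b

-- ===== VERDICT (by name: the statement is the Claim_ definition above) =====
theorem ciudades_con_ola_de_frio_spec : Claim_equal_ciudades_con_ola_de_frio := by
  intro lt nc n _ hpre
  unfold Spec_ciudades_con_ola_de_frio ciudades_con_ola_de_frio ciudades_con_ola_de_frio_alt
  cases lt with
  | nil => rfl
  | cons f rest =>
    apply PySem.List.foldl_congr_mem
    intro acc i hi
    rw [PySem.List.mem_pyRange_one] at hi
    simp only [List.length_cons] at hi
    push_cast at hi
    simp only [PySem.List.pyGetD_zero_cons]
    set fila := PySem.List.pyGetD (f :: rest) i [] with hfila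
    have hmem : fila ∈ (f :: rest) :=
      PySem.List.pyGetD_mem (f :: rest) [] (by
        simp [PySem.Raise.InRange, List.length_cons]
        omega)
    have hrow : f.length ≤ fila.length := by simpa using hpre.2 fila hmem
    set m := fila.take f.length with hm
    have htake : m.length = f.length := by simp [hm, Nat.min_eq_left hrow]
    have hslice : PySem.List.slice fila none (some (f.length : Int)) = m :=
      PySem.List.slice_to_natCast fila f.length
    have hA : List.foldl
        (fun (p : Int × Int) j =>
          if PySem.List.pyGetD fila j 0 < 0 then (p.1 + 1, p.2)
          else (0, if p.2 < p.1 then p.1 else p.2)) (0, -1)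
        (PySem.List.pyRange 0 (f.length : Int) 1)
        = List.foldl (fun (p : Int × Int) x =>
          if x < 0 then (p.1 + 1, p.2) else (0, if p.2 < p.1 then p.1 else p.2)) (0, -1) m := by
      rw [show ((f.length : Int)) = ((m.length : Int)) by rw [htake]]
      rw [PySem.List.foldl_congr_mem _ _
        (fun (p : Int × Int) j =>
          if PySem.List.pyGetD m j 0 < 0 then (p.1 + 1, p.2)
          else (0, if p.2 < p.1 then p.1 else p.2)) _ ?_]
      · exact PySem.List.foldl_pyRange_zero_pyGetD' m 0
          (fun (p : Int × Int) x =>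
            if x < 0 then (p.1 + 1, p.2) else (0, if p.2 < p.1 then p.1 else p.2)) (0, -1)
      · intro acc' j hj
        beta_reduce
        rw [PySem.List.mem_pyRange_one] at hj
        have hj1 : j < (m.length : Int) := hj.2
        have hj2 : j < (fila.length : Int) := by
          rw [htake] at hj1; omega
        rw [PySem.List.pyGetD_eq_getElem m 0 hj.1 hj1,
            PySem.List.pyGetD_eq_getElem fila 0 hj.1 hj2]
        simp only [hm, List.getElem_take]
    rw [hslice, hA, racha_eq]
    have key := aRun m 0 (-1)
    rw [key]
    have hnn : 0 ≤ negRunG 0 m := negRunG_nonneg m 0 le_rfl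
    rw [max_eq_right (by omega)]
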